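-- pv_equiv track=rewrite | github.com/Xrenya/Algorithms | yandex/Lecture_5/Lecture/main.py | makeprefixsum
-- ===== SOURCE A (Python) =====
-- def makeprefixsum(nums):
--     prefixsum = [0] * (len(nums) + 1)
--     for i in range(1, len(nums)+1):
--         if nums[i-1] == 0:
--             prefixsum[i] = prefixsum[i-1] + 1
--         else:
--             prefixsum[i] = prefixsum[i-1]
--     return prefixsum
-- ===== SOURCE B (Python) =====
-- def makeprefixsum(nums):
--     total = sum(1 for x in nums if x == 0)
--     out = []
--     rem = total
--     for x in reversed(nums):
--         out.append(rem)
--         if x == 0: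
--             rem -= 1
--     out.append(rem)
--     out.reverse()
--     return out
-- ===== Notes on version B (the rewrite author's own statement) =====
-- stated objective: alternative
-- what changed: First counts all zeros, then builds the result back-to-front over reversed(nums), maintaining the number of zeros remaining to the left and reversing at the end, instead of A's forward index loop accumulating prefixsum[i-1] into a preallocated array.
import Mathlib
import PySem

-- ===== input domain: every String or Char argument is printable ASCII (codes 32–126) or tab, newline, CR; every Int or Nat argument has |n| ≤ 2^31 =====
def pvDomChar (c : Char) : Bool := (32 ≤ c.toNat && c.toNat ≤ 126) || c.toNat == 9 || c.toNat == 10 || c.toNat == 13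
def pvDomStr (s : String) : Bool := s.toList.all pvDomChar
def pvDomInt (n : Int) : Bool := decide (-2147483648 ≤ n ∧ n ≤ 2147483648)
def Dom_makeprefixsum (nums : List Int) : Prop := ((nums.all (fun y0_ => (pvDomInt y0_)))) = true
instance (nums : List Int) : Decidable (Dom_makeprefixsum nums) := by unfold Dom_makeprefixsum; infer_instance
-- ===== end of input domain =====

-- B counts the zeros once, then builds the output back-to-front (reversed traversal keeping
-- the count of zeros remaining to the left, final reverse) instead of A's forward index loop.

-- ===== PORT A =====
-- prefixsum = [0]*(n+1); for i in range(1, n+1): branch on nums[i-1] == 0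
def makeprefixsum (nums : List Int) : List Int :=
  let prefixsum := List.replicate (nums.length + 1) (0 : Int)
  (PySem.List.pyRange 1 ((nums.length : Int) + 1) 1).foldl
    (fun ps i =>
      if PySem.List.pyGetD nums (i - 1) 0 == 0 then
        PySem.List.pySetD ps i (PySem.List.pyGetD ps (i - 1) 0 + 1)
      else
        PySem.List.pySetD ps i (PySem.List.pyGetD ps (i - 1) 0))
    prefixsum

-- ===== PORT B =====
-- total = sum(1 for x in nums if x == 0); loop over reversed(nums) appending rem and
-- decrementing it at each zero; append rem; reverse in place
def makeprefixsum_alt (nums : List Int) : List Int :=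
  let total := nums.foldl (fun a x => if x == 0 then a + 1 else a) (0 : Int)
  let s := nums.reverse.foldl
    (fun (s : List Int × Int) x =>
      (s.1 ++ [s.2], if x == 0 then s.2 - 1 else s.2))
    (([] : List Int), total)
  (s.1 ++ [s.2]).reverse

-- ===== PRECONDITION & SPEC =====
def Spec_makeprefixsum (nums : List Int) (out : List Int) : Prop := out = makeprefixsum_alt nums
instance (nums : List Int) (out : List Int) : Decidable (Spec_makeprefixsum nums out) := by unfold Spec_makeprefixsum; infer_instance

-- ===== CLAIM (what is proved, stated in full; the proofs are below) =====
def Claim_equal_makeprefixsum : Prop := ∀ (nums : List Int), Dom_makeprefixsum nums → Spec_makeprefixsum nums (makeprefixsum nums)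

-- ===== LEMMAS AND PROOFS =====

def pvInd (x : Int) : Int := if x == 0 then 1 else 0

def pvCnt : List Int → Int
  | [] => 0
  | x :: xs => pvInd x + pvCnt xs

theorem scanl_add_snoc (l : List Int) (b a : Int) :
    List.scanl (· + ·) b (l ++ [a]) = List.scanl (· + ·) b l ++ [l.foldl (· + ·) b + a] := by
  induction l generalizing b with
  | nil => simp
  | cons x xs ih => simp [List.scanl_cons, ih]

theorem scanl_add_getD_last (l : List Int) (b : Int) :
    (List.scanl (· + ·) b l).getD l.length 0 = l.foldl (· + ·) b := by
  induction l generalizing b with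
  | nil => simp
  | cons x xs ih => simpa [List.scanl_cons] using ih (b + x)

-- loop invariant for A: after the first k iterations the list is the scan of the first k
-- indicators followed by the untouched zeros
theorem loopA (nums : List Int) (k : Nat) (hk : k ≤ nums.length) :
    (PySem.List.pyRange 1 ((k : Int) + 1) 1).foldl
      (fun ps i =>
        if PySem.List.pyGetD nums (i - 1) 0 == 0 then
          PySem.List.pySetD ps i (PySem.List.pyGetD ps (i - 1) 0 + 1)
        else
          PySem.List.pySetD ps i (PySem.List.pyGetD ps (i - 1) 0))
      (List.replicate (nums.length + 1) (0 : Int))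
    = List.scanl (· + ·) 0 ((nums.take k).map pvInd)
        ++ List.replicate (nums.length - k) 0 := by
  induction k with
  | zero =>
    have h1 : (List.replicate (nums.length + 1) (0 : Int)) = 0 :: List.replicate nums.length 0 := by
      simp [List.replicate]
    simp [PySem.List.pyRange_one_eq_nil, h1]
  | succ k ih =>
    have hk' : k ≤ nums.length := Nat.le_of_succ_le hk
    have hklt : k < nums.length := hk
    have hsplit : PySem.List.pyRange 1 ((k : Int) + 1 + 1) 1
        = PySem.List.pyRange 1 ((k : Int) + 1) 1 ++ [(k : Int) + 1] :=
      PySem.List.pyRange_one_succ_right (by omega)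
    rw [show ((k + 1 : Nat) : Int) + 1 = (k : Int) + 1 + 1 by push_cast; ring, hsplit,
        List.foldl_append, ih hk']
    have hlenS : (List.scanl (· + ·) 0 ((nums.take k).map pvInd)).length = k + 1 := by
      simp [List.length_scanl, hk']
    have hrep : List.replicate (nums.length - k) (0 : Int)
        = 0 :: List.replicate (nums.length - (k + 1)) 0 := by
      rw [show nums.length - k = (nums.length - (k + 1)) + 1 by omega]
      simp [List.replicate]
    have hget : PySem.List.pyGetD
        (List.scanl (· + ·) 0 ((nums.take k).map pvInd) ++ List.replicate (nums.length - k) (0 : Int))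
        ((k : Int) + 1 - 1) 0
        = ((nums.take k).map pvInd).foldl (· + ·) 0 := by
      rw [show ((k : Int) + 1 - 1) = ((k : Nat) : Int) by ring, PySem.List.pyGetD_natCast]
      rw [List.getD_eq_getElem?_getD, List.getElem?_append_left (by omega),
          ← List.getD_eq_getElem?_getD]
      have h2 := scanl_add_getD_last ((nums.take k).map pvInd) 0
      simp only [List.length_map, List.length_take, min_eq_left hk'] at h2
      exact h2
    have hnum : PySem.List.pyGetD nums ((k : Int) + 1 - 1) 0 = nums[k] := by
      rw [show ((k : Int) + 1 - 1) = ((k : Nat) : Int) by ring, PySem.List.pyGetD_natCast]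
      simp [List.getD_eq_getElem?_getD, List.getElem?_eq_getElem hklt]
    have hset : ∀ v : Int,
        PySem.List.pySetD
          (List.scanl (· + ·) 0 ((nums.take k).map pvInd) ++ List.replicate (nums.length - k) (0 : Int))
          ((k : Int) + 1) v
        = List.scanl (· + ·) 0 ((nums.take k).map pvInd)
            ++ (v :: List.replicate (nums.length - (k + 1)) 0) := by
      intro v
      rw [PySem.List.pySetD_of_nonneg _ _ (by omega),
          show ((k : Int) + 1).toNat = k + 1 by omega, hrep,
          List.set_append_right _ _ (by omega), hlenS]
      simp
    have htake : nums.take (k + 1) = nums.take k ++ [nums[k]] := by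
      simpa [List.getElem?_eq_getElem hklt] using
        (List.take_add_one (l := nums) (i := k))
    have hsc : List.scanl (· + ·) 0 ((nums.take (k + 1)).map pvInd)
        = List.scanl (· + ·) 0 ((nums.take k).map pvInd)
            ++ [((nums.take k).map pvInd).foldl (· + ·) 0 + pvInd nums[k]] := by
      rw [htake, List.map_append, List.map_singleton, scanl_add_snoc]
    rw [hsc, List.append_assoc]
    simp only [List.foldl_cons, List.foldl_nil, List.singleton_append]
    by_cases h0 : nums[k] = 0
    · rw [if_pos (by simp [List.getElem?_eq_getElem hklt, h0]), hget, hset]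
      simp [pvInd, h0]
    · rw [if_neg (by simp [List.getElem?_eq_getElem hklt, h0]), hget, hset]
      simp [pvInd, h0]

-- the counting pass of B computes pvCnt
theorem cntB (l : List Int) (b : Int) :
    l.foldl (fun a x => if x == 0 then a + 1 else a) b = b + pvCnt l := by
  induction l generalizing b with
  | nil => simp [pvCnt]
  | cons x xs ih =>
    rw [List.foldl_cons]
    by_cases h : x = 0
    · rw [if_pos (by simp [h]), ih]
      have : pvInd x = (1 : Int) := by simp [pvInd, h]
      simp only [pvCnt, this]
      ring
    · rw [if_neg (by simp [h]), ih]
      have : pvInd x = (0 : Int) := by simp [pvInd, h]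
      simp only [pvCnt, this]
      ring

-- the second component of B's backward loop is the zeros not yet passed
theorem sndB (l : List Int) (o : List Int) (R : Int) :
    (l.foldr (fun x (s : List Int × Int) =>
      (s.1 ++ [s.2], if x == 0 then s.2 - 1 else s.2)) (o, R)).2 = R - pvCnt l := by
  induction l with
  | nil => simp [pvCnt]
  | cons x xs ih =>
    rw [List.foldr_cons]
    by_cases h : x = 0
    · have hpv : pvInd x = (1 : Int) := by simp [pvInd, h]
      show (if x == 0 then _ - 1 else _) = _
      rw [if_pos (by simp [h]), ih]
      simp only [pvCnt, hpv]
      ring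
    · have hpv : pvInd x = (0 : Int) := by simp [pvInd, h]
      show (if x == 0 then _ - 1 else _) = _
      rw [if_neg (by simp [h]), ih]
      simp only [pvCnt, hpv]
      ring

-- B's backward loop, written as a foldr, produces the reversed scan of the indicators
theorem loopB (l : List Int) (o : List Int) (R : Int) :
    (((l.foldr (fun x (s : List Int × Int) =>
        (s.1 ++ [s.2], if x == 0 then s.2 - 1 else s.2)) (o, R)).1
      ++ [(l.foldr (fun x (s : List Int × Int) =>
        (s.1 ++ [s.2], if x == 0 then s.2 - 1 else s.2)) (o, R)).2]).reverse)
    = List.scanl (· + ·) (R - pvCnt l) (l.map pvInd) ++ o.reverse := by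
  induction l with
  | nil => simp [pvCnt]
  | cons x xs ih =>
    have hsnd := sndB xs o R
    simp only [List.foldr_cons, pvCnt, List.map_cons, List.scanl_cons]
    rw [List.reverse_append, ih, hsnd]
    by_cases h : x = 0
    · have hpv : pvInd x = (1 : Int) := by simp [pvInd, h]
      rw [hpv, if_pos (by simp [h]),
          show R - (1 + pvCnt xs) + 1 = R - pvCnt xs from by ring,
          show R - pvCnt xs - 1 = R - (1 + pvCnt xs) from by ring]
      simp
    · have hpv : pvInd x = (0 : Int) := by simp [pvInd, h]
      rw [hpv, if_neg (by simp [h]),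
          show R - (0 + pvCnt xs) + 0 = R - pvCnt xs from by ring,
          show R - pvCnt xs = R - (0 + pvCnt xs) from by ring]
      simp

-- ===== VERDICT (by name: the statement is the Claim_ definition above) =====
theorem makeprefixsum_spec : Claim_equal_makeprefixsum := by
  intro nums _
  show makeprefixsum nums = makeprefixsum_alt nums
  have hA : makeprefixsum nums = List.scanl (· + ·) 0 (nums.map pvInd) := by
    unfold makeprefixsum
    have h := loopA nums nums.length le_rfl
    simpa using h
  have hB : makeprefixsum_alt nums = List.scanl (· + ·) 0 (nums.map pvInd) := by
    show ((nums.reverse.foldl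
        (fun (s : List Int × Int) x => (s.1 ++ [s.2], if x == 0 then s.2 - 1 else s.2))
        (([] : List Int), nums.foldl (fun a x => if x == 0 then a + 1 else a) (0 : Int))).1
      ++ [(nums.reverse.foldl
        (fun (s : List Int × Int) x => (s.1 ++ [s.2], if x == 0 then s.2 - 1 else s.2))
        (([] : List Int), nums.foldl (fun a x => if x == 0 then a + 1 else a) (0 : Int))).2]).reverse
      = List.scanl (· + ·) 0 (nums.map pvInd)
    rw [List.foldl_reverse, cntB]
    have h := loopB nums [] (0 + pvCnt nums)
    simpa using h
  rw [hA, hB]
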